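-- pv_equiv track=rewrite | github.com/cotalla/oracle-upgrade-automation-factory | aws-deploy/lambdas/deterministic/app.py | _extract_excerpts
-- ===== SOURCE A (Python) =====
-- def _extract_excerpts(text: str, codes: list[str], context_lines: int = 2, max_total_lines: int = 20) -> dict[str, list[str]]:
--     excerpts: dict[str, list[str]] = {}
--     if not text or not codes:
--         return excerpts
--
--     lines = (text or "").splitlines()
--     used = 0
--
--     for code in codes:
--         code_u = code.upper()
--         hit_idx = None
--         for i, ln in enumerate(lines):
--             if code_u in ln.upper():
--                 hit_idx = i
--                 break
--         if hit_idx is None: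
--             continue
--
--         start = max(0, hit_idx - context_lines)
--         end = min(len(lines), hit_idx + context_lines + 1)
--         chunk = lines[start:end]
--
--         remaining = max_total_lines - used
--         if remaining <= 0:
--             break
--         if len(chunk) > remaining:
--             chunk = chunk[:remaining]
--
--         excerpts[code_u] = chunk
--         used += len(chunk)
--
--     return excerpts
-- ===== SOURCE B (Python) =====
-- def _extract_excerpts(text: str, codes: list[str], context_lines: int = 2, max_total_lines: int = 20) -> dict[str, list[str]]:
--     excerpts: dict[str, list[str]] = {}
--     if not text or not codes:
--         return excerpts
--
--     lines = text.splitlines()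
--
--     # Stage 1: one scan over the lines, locating the first occurrence of every
--     # distinct uppercased code; stop as soon as all codes are found.
--     pending = {c.upper() for c in codes}
--     first_hit: dict[str, int] = {}
--     for i, ln in enumerate(lines):
--         if not pending:
--             break
--         ln_u = ln.upper()
--         found = {c for c in pending if c in ln_u}
--         for c in found:
--             first_hit[c] = i
--         pending -= found
--
--     # Stage 2: build the ordered candidate list of (code_u, full context window)
--     # for every code occurrence that has a hit (duplicates kept, as each one
--     # spends budget in A too).
--     candidates = []
--     for code in codes:
--         cu = code.upper()
--         if cu in first_hit:
--             h = first_hit[cu]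
--             start = max(0, h - context_lines)
--             end = min(len(lines), h + context_lines + 1)
--             candidates.append((cu, lines[start:end]))
--
--     # Stage 3: spend the line budget down the candidate list; chunk[:budget]
--     # clamps, so no explicit truncation branch is needed.
--     budget = max_total_lines
--     for cu, chunk in candidates:
--         if budget <= 0:
--             break
--         kept = chunk[:budget]
--         excerpts[cu] = kept
--         budget -= len(kept)
--
--     return excerpts
-- ===== Notes on version B (the rewrite author's own statement) =====
-- stated objective: alternative
-- what changed: A's single loop rescans and re-uppercases all lines per code while interleaving budget spending; B is three staged passes: one line scan tabulating first hits of the distinct uppercased codes, a pass building the ordered (code, context window) candidate list, and a budget fold consuming that list with a clamping chunk[:budget] slice.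
import Mathlib
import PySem

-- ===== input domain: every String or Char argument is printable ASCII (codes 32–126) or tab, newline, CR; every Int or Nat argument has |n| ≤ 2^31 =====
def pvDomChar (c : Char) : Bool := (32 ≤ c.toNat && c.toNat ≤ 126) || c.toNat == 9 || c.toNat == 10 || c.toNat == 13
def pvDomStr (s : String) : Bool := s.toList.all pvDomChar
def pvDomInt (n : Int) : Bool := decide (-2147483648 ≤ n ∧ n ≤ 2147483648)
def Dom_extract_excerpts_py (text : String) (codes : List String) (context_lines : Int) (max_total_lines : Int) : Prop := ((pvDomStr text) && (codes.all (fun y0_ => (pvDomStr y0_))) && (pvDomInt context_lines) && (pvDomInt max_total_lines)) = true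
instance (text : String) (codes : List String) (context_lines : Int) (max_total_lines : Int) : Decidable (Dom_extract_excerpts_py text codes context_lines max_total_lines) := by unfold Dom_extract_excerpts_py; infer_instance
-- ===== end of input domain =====

-- B replaces A's single loop (which rescans and re-uppercases all lines per code and
-- interleaves scanning with budget spending) by three staged passes: one line scan
-- tabulating the first hit of each distinct uppercased code, a pass building the
-- ordered candidate (code, window) list, and a budget fold consuming that list
-- (objective: alternative decomposition, same cost).

-- ===== PORT A =====

-- inner 'for i, ln in enumerate(lines): if code_u in ln.upper(): hit_idx = i; break'
def pvAHit (code_u : String) : List String → Nat → Option Nat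
  | [], _ => none
  | ln :: rest, i =>
    if PySem.Str.isIn code_u (PySem.Str.upper ln) then some i
    else pvAHit code_u rest (i + 1)

-- A's main 'for code in codes' loop (break modelled by returning the dict)
def pvALoop (lines : List String) (context_lines max_total_lines : Int) :
    List String → PySem.Dict String (List String) → Int → PySem.Dict String (List String)
  | [], excerpts, _ => excerpts
  | code :: rest, excerpts, used =>
    let code_u := PySem.Str.upper code
    match pvAHit code_u lines 0 with
    | none => pvALoop lines context_lines max_total_lines rest excerpts used
    | some hit_idx =>
      let start := max 0 ((hit_idx : Int) - context_lines)
      let stop := min (lines.length : Int) ((hit_idx : Int) + context_lines + 1)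
      let chunk := PySem.List.slice lines (some start) (some stop)
      let remaining := max_total_lines - used
      if remaining ≤ 0 then excerpts
      else
        let chunk := if remaining < (chunk.length : Int)
          then PySem.List.slice chunk none (some remaining) else chunk
        pvALoop lines context_lines max_total_lines rest
          (excerpts.insert code_u chunk) (used + chunk.length)

def extract_excerpts_py (text : String) (codes : List String) (context_lines : Int) (max_total_lines : Int) : List (String × List String) :=
  if text = "" ∨ codes = [] then []
  else
    (pvALoop (PySem.Str.splitlines text) context_lines max_total_lines
      codes PySem.Dict.empty 0).items

-- ===== PORT B =====

-- stage 1: one scan over the lines, recording the first hit of each pending code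
def pvBTable : List String → Nat → List String → PySem.Dict String Nat → PySem.Dict String Nat
  | [], _, _, t => t
  | ln :: rest, i, pending, t =>
    if pending = [] then t
    else
      let lnU := PySem.Str.upper ln
      let found := pending.filter (fun c => PySem.Str.isIn c lnU)
      let t' := found.foldl (fun t c => t.insert c i) t
      pvBTable rest (i + 1) (pending.filter (fun c => !(PySem.Str.isIn c lnU))) t'

-- stage 2: ordered candidate list of (code_u, full context window), duplicates kept
def pvBCands (lines : List String) (context_lines : Int) (table : PySem.Dict String Nat) :
    List String → List (String × List String)
  | [] => []
  | code :: rest =>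
    let cu := PySem.Str.upper code
    match table.get? cu with
    | none => pvBCands lines context_lines table rest
    | some h =>
      let start := max 0 ((h : Nat) - context_lines : Int)
      let stop := min (lines.length : Int) ((h : Int) + context_lines + 1)
      (cu, PySem.List.slice lines (some start) (some stop)) ::
        pvBCands lines context_lines table rest

-- stage 3: spend the line budget down the candidate list (chunk[:budget] clamps)
def pvBBudget : List (String × List String) → Int → PySem.Dict String (List String) → PySem.Dict String (List String)
  | [], _, excerpts => excerpts
  | (cu, chunk) :: rest, budget, excerpts =>
    if budget ≤ 0 then excerpts
    else
      let kept := PySem.List.slice chunk none (some budget)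
      pvBBudget rest (budget - kept.length) (excerpts.insert cu kept)

def extract_excerpts_py_alt (text : String) (codes : List String) (context_lines : Int) (max_total_lines : Int) : List (String × List String) :=
  if text = "" ∨ codes = [] then []
  else
    let lines := PySem.Str.splitlines text
    let table := pvBTable lines 0
      (PySem.Set.ofList (codes.map PySem.Str.upper)) PySem.Dict.empty
    (pvBBudget (pvBCands lines context_lines table codes) max_total_lines
      PySem.Dict.empty).items

-- ===== PRECONDITION & SPEC =====
def Spec_extract_excerpts_py (text : String) (codes : List String) (context_lines : Int) (max_total_lines : Int) (out : List (String × List String)) : Prop := out = extract_excerpts_py_alt text codes context_lines max_total_lines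
instance (text : String) (codes : List String) (context_lines : Int) (max_total_lines : Int) (out : List (String × List String)) : Decidable (Spec_extract_excerpts_py text codes context_lines max_total_lines out) := by unfold Spec_extract_excerpts_py; infer_instance

-- ===== CLAIM (what is proved, stated in full; the proofs are below) =====
def Claim_equal_extract_excerpts_py : Prop := ∀ (text : String) (codes : List String) (context_lines : Int) (max_total_lines : Int), Dom_extract_excerpts_py text codes context_lines max_total_lines → Spec_extract_excerpts_py text codes context_lines max_total_lines (extract_excerpts_py text codes context_lines max_total_lines)

-- ===== LEMMAS AND PROOFS =====

-- folding 'insert k i' over a key list: lookup is 'some i' for keys of the list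
theorem pv_get?_foldl_insert (l : List String) (t : PySem.Dict String Nat) (i : Nat) (c : String) :
    (l.foldl (fun t k => t.insert k i) t).get? c
      = if c ∈ l then some i else t.get? c := by
  induction l generalizing t with
  | nil => simp
  | cons k ks ih =>
    rw [List.foldl_cons, ih]
    by_cases hc : c ∈ ks
    · simp [hc]
    · by_cases hk : c = k
      · subst hk; simp [hc, PySem.Dict.get?_insert_self]
      · rw [if_neg hc, if_neg (by simp [hc, hk])]
        exact PySem.Dict.get?_insert_of_ne t i hk

-- keys not pending are never touched by the table-building pass
theorem pv_bTable_not_pending (ls : List String) (i : Nat) (pending : List String)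
    (t : PySem.Dict String Nat) (c : String) (hc : c ∉ pending) :
    (pvBTable ls i pending t).get? c = t.get? c := by
  induction ls generalizing i pending t with
  | nil => simp [pvBTable]
  | cons ln rest ih =>
    by_cases hp : pending = []
    · simp [pvBTable, hp]
    · simp only [pvBTable, if_neg hp]
      rw [ih _ _ _ (fun h => hc (List.mem_of_mem_filter h)), pv_get?_foldl_insert,
        if_neg (fun h => hc (List.mem_of_mem_filter h))]

-- for a still-pending, not-yet-recorded key the table yields A's first-hit scan
theorem pv_bTable_pending (ls : List String) (i : Nat) (pending : List String)
    (t : PySem.Dict String Nat) (c : String) (hc : c ∈ pending) (ht : t.get? c = none) :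
    (pvBTable ls i pending t).get? c = pvAHit c ls i := by
  induction ls generalizing i pending t with
  | nil => simp [pvBTable, pvAHit, ht]
  | cons ln rest ih =>
    have hp : pending ≠ [] := by rintro rfl; simp at hc
    simp only [pvBTable, if_neg hp, pvAHit]
    by_cases hin : PySem.Str.isIn c (PySem.Str.upper ln) = true
    · rw [if_pos hin,
        pv_bTable_not_pending _ _ _ _ _
          (by intro hmem
              have h2 := (List.mem_filter.mp hmem).2
              rw [hin] at h2
              simp at h2),
        pv_get?_foldl_insert,
        if_pos (List.mem_filter.mpr ⟨hc, by rw [hin]⟩)]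
    · rw [if_neg hin]
      apply ih _ _ _ (List.mem_filter.mpr ⟨hc, by simp [Bool.not_eq_true] at hin ⊢; rw [hin]⟩)
      rw [pv_get?_foldl_insert,
        if_neg (by intro hmem; exact hin (by simpa using (List.mem_filter.mp hmem).2)), ht]

-- chunk[:r] for positive r equals A's conditional truncation
theorem pv_slice_trunc (chunk : List String) (r : Int) (hr : 0 < r) :
    PySem.List.slice chunk none (some r)
      = if r < (chunk.length : Int) then PySem.List.slice chunk none (some r) else chunk := by
  split_ifs with h
  · rfl
  · rw [PySem.List.slice_to chunk (le_of_lt hr), List.take_of_length_le (by omega)]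

-- A's interleaved loop equals B's candidate list consumed by the budget fold,
-- once the table answers every code like A's scan
theorem pv_loops_eq (lines : List String) (cl mtl : Int) (table : PySem.Dict String Nat)
    (cs : List String) (excerpts : PySem.Dict String (List String)) (used : Int)
    (h : ∀ code ∈ cs, table.get? (PySem.Str.upper code) = pvAHit (PySem.Str.upper code) lines 0) :
    pvALoop lines cl mtl cs excerpts used
      = pvBBudget (pvBCands lines cl table cs) (mtl - used) excerpts := by
  induction cs generalizing excerpts used with
  | nil => rfl
  | cons code rest ih =>
    have hh := h code (List.mem_cons_self)
    have hrest : ∀ c ∈ rest, table.get? (PySem.Str.upper c) = pvAHit (PySem.Str.upper c) lines 0 :=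
      fun c hcr => h c (List.mem_cons_of_mem _ hcr)
    cases hx : pvAHit (PySem.Str.upper code) lines 0 with
    | none =>
      simp only [pvALoop, pvBCands, hh, hx]
      exact ih _ _ hrest
    | some hit_idx =>
      simp only [pvALoop, pvBCands, pvBBudget, hh, hx]
      by_cases hb : mtl - used ≤ 0
      · rw [if_pos hb, if_pos hb]
      · rw [if_neg hb, if_neg hb,
          pv_slice_trunc _ (mtl - used) (by omega)]
        split_ifs with hl
        · rw [ih _ _ hrest]; ring_nf
        · rw [ih _ _ hrest]; ring_nf

-- ===== VERDICT (by name: the statement is the Claim_ definition above) =====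
theorem extract_excerpts_py_spec : Claim_equal_extract_excerpts_py := by
  intro text codes cl mtl _
  unfold Spec_extract_excerpts_py extract_excerpts_py extract_excerpts_py_alt
  by_cases h : text = "" ∨ codes = []
  · simp [h]
  · simp only [if_neg h]
    rw [pv_loops_eq (PySem.Str.splitlines text) cl mtl _ codes PySem.Dict.empty 0
      (fun code hcode =>
        pv_bTable_pending _ _ _ _ _
          ((PySem.Set.mem_ofList _ _).mpr (List.mem_map_of_mem hcode))
          (PySem.Dict.get?_empty _)),
      sub_zero]
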